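-- pv_equiv track=rewrite | github.com/nasonliu/story-manifold-engine | scripts/enhance_titles.py | find_duplicate_titles
-- ===== SOURCE A (Python) =====
-- from typing import Dict, List, Tuple
--
-- def find_duplicate_titles(skeletons: List[dict], threshold: int = 10) -> Dict[str, List[dict]]:
--     """Find titles that appear more than threshold times."""
--     title_map = {}
--     for sk in skeletons:
--         title = sk.get('title', '').strip()
--         if title:
--             if title not in title_map:
--                 title_map[title] = []
--             title_map[title].append(sk)
--
--     return {t: items for t, items in title_map.items() if len(items) > threshold}
-- ===== SOURCE B (Python) =====
-- def find_duplicate_titles(skeletons, threshold=10):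
--     """Find titles that appear more than threshold times."""
--     counts = {}
--     for sk in skeletons:
--         t = sk.get('title', '').strip()
--         if t:
--             counts[t] = counts.get(t, 0) + 1
--     result = {}
--     for sk in skeletons:
--         t = sk.get('title', '').strip()
--         if t and counts[t] > threshold:
--             if t not in result:
--                 result[t] = []
--             result[t].append(sk)
--     return result
-- ===== Notes on version B (the rewrite author's own statement) =====
-- stated objective: alternative
-- what changed: B counts each stripped title in a first pass, then builds the result dict in a second pass appending only skeletons whose title count exceeds the threshold, so the final filtering step over grouped lists disappears.
import Mathlib
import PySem

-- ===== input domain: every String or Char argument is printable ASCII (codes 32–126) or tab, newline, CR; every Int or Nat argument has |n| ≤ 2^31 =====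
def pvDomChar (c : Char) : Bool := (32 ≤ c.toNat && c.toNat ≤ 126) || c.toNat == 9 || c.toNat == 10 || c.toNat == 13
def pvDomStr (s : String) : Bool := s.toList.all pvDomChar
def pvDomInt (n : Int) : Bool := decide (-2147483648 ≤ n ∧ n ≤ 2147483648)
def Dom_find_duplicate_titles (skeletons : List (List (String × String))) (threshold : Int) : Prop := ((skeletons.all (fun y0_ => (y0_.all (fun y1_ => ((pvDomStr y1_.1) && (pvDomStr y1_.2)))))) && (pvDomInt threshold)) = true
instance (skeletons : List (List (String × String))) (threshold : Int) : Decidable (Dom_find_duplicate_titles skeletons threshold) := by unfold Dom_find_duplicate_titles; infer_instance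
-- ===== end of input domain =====

-- B replaces A's group-everything-then-filter by a count-first pass and a second pass that
-- only groups titles whose count exceeds the threshold (objective: alternative, same cost).

-- shared one-liner for the Python expression sk.get('title', '').strip()
def pvTitle (sk : List (String × String)) : String :=
  PySem.Str.strip ((PySem.Dict.ofList sk).getD "title" "")

-- ===== PORT A =====
def find_duplicate_titles (skeletons : List (List (String × String))) (threshold : Int) : List (String × List (List (String × String))) :=
  let title_map : PySem.Dict String (List (List (String × String))) :=
    skeletons.foldl (fun d sk =>
      let title := pvTitle sk
      -- 'if title not in title_map: title_map[title] = []' followed by '.append(sk)' is Dict.modify with default []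
      if title ≠ "" then d.modify title [] (· ++ [sk]) else d) PySem.Dict.empty
  title_map.items.filter (fun p => decide ((p.2.length : Int) > threshold))

-- ===== PORT B =====
def find_duplicate_titles_alt (skeletons : List (List (String × String))) (threshold : Int) : List (String × List (List (String × String))) :=
  let counts : PySem.Dict String Int :=
    skeletons.foldl (fun d sk =>
      let t := pvTitle sk
      -- 'counts[t] = counts.get(t, 0) + 1' is Dict.modify with default 0
      if t ≠ "" then d.modify t 0 (· + 1) else d) PySem.Dict.empty
  let result : PySem.Dict String (List (List (String × String))) :=
    skeletons.foldl (fun r sk =>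
      let t := pvTitle sk
      -- 'if t not in result: result[t] = []' followed by '.append(sk)' is Dict.modify with default []
      if t ≠ "" ∧ counts.getD t 0 > threshold then r.modify t [] (· ++ [sk]) else r) PySem.Dict.empty
  result.items

-- ===== PRECONDITION & SPEC =====
def Spec_find_duplicate_titles (skeletons : List (List (String × String))) (threshold : Int) (out : List (String × List (List (String × String)))) : Prop := out = find_duplicate_titles_alt skeletons threshold
instance (skeletons : List (List (String × String))) (threshold : Int) (out : List (String × List (List (String × String)))) : Decidable (Spec_find_duplicate_titles skeletons threshold out) := by unfold Spec_find_duplicate_titles; infer_instance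

-- ===== CLAIM (what is proved, stated in full; the proofs are below) =====
def Claim_equal_find_duplicate_titles : Prop := ∀ (skeletons : List (List (String × String))) (threshold : Int), Dom_find_duplicate_titles skeletons threshold → Spec_find_duplicate_titles skeletons threshold (find_duplicate_titles skeletons threshold)

-- ===== LEMMAS AND PROOFS =====

theorem pv_filter_add {α : Type} [BEq α] [LawfulBEq α] (p : α → Bool) (s : List α) (x : α) :
    (PySem.Set.add s x).filter p = if p x then PySem.Set.add (s.filter p) x else s.filter p := by
  by_cases hm : x ∈ s
  · have h1 : PySem.Set.add s x = s := by simp [PySem.Set.add, hm]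
    rw [h1]
    by_cases hp : p x
    · have : x ∈ s.filter p := List.mem_filter.mpr ⟨hm, hp⟩
      simp [PySem.Set.add, this, hp]
    · simp [hp]
  · have h1 : PySem.Set.add s x = s ++ [x] := by simp [PySem.Set.add, hm]
    have hnf : x ∉ s.filter p := fun h => hm (List.mem_filter.mp h).1
    rw [h1, List.filter_append]
    by_cases hp : p x
    · have h2 : PySem.Set.add (s.filter p) x = s.filter p ++ [x] := by
        simp [PySem.Set.add, hnf]
      simp [hp, h2]
    · simp [hp]

theorem pv_foldl_add_filter {α : Type} [BEq α] [LawfulBEq α] (p : α → Bool) (xs : List α) (s : List α) :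
    (xs.foldl PySem.Set.add s).filter p = (xs.filter p).foldl PySem.Set.add (s.filter p) := by
  induction xs generalizing s with
  | nil => rfl
  | cons x xs ih =>
    simp only [List.foldl_cons, List.filter_cons]
    rw [ih, pv_filter_add]
    by_cases hp : p x <;> simp [hp]

-- building a Python set commutes with filtering
theorem pv_ofList_filter {α : Type} [BEq α] [LawfulBEq α] (p : α → Bool) (xs : List α) :
    PySem.Set.ofList (xs.filter p) = (PySem.Set.ofList xs).filter p := by
  rw [PySem.Set.ofList_eq_foldl, PySem.Set.ofList_eq_foldl, pv_foldl_add_filter]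
  rfl

-- the skeletons with a non-empty stripped title
def pvL (skeletons : List (List (String × String))) : List (List (String × String)) :=
  skeletons.filter (fun sk => decide (pvTitle sk ≠ ""))

-- closed form of a guarded grouping fold's dict: items = distinct keys paired with their groups
theorem pv_group_items (q : List (String × String) → Prop) [DecidablePred q]
    (skeletons : List (List (String × String))) :
    (skeletons.foldl (fun d sk =>
      if q sk then d.modify (pvTitle sk) [] (· ++ [sk]) else d)
      (PySem.Dict.empty (κ := String) (ν := List (List (String × String))))).items =
    (PySem.Set.ofList (((skeletons.filter (fun sk => decide (q sk))).map pvTitle))).map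
      (fun k => (k, (skeletons.filter (fun sk => decide (q sk))).filter (fun sk => pvTitle sk == k))) := by
  have heq := PySem.List.foldl_ite_eq_foldl_filter q
      (fun (d : PySem.Dict String (List (List (String × String)))) sk =>
        d.modify (pvTitle sk) [] (· ++ [sk])) skeletons PySem.Dict.empty
  rw [heq]
  set F := skeletons.filter (fun sk => decide (q sk)) with hF
  have hnd : ((F.foldl (fun d sk => d.modify (pvTitle sk) [] (· ++ [sk]))
      (PySem.Dict.empty (κ := String) (ν := List (List (String × String))))).keys).Nodup :=
    PySem.Dict.nodup_keys_foldl_modify_key F pvTitle [] (fun _ sk => (· ++ [sk])) _ (by simp)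
  rw [PySem.Dict.items_eq_map_keys _ hnd []]
  have hkeys : ((F.foldl (fun d sk => d.modify (pvTitle sk) [] (· ++ [sk]))
      (PySem.Dict.empty (κ := String) (ν := List (List (String × String))))).keys) =
      PySem.Set.ofList (F.map pvTitle) := by
    rw [PySem.Dict.keys_foldl_modify_key F pvTitle [] (fun _ sk => (· ++ [sk]))]
    simp [PySem.Set.update, PySem.Set.ofList_eq_foldl, PySem.Dict.keys, PySem.Dict.empty]
  rw [hkeys]
  apply List.map_congr_left
  intro k _
  congr 1
  have hfold : F.foldl (fun d sk => d.modify (pvTitle sk) [] (· ++ [sk]))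
      (PySem.Dict.empty (κ := String) (ν := List (List (String × String)))) =
      (F.map (fun sk => (pvTitle sk, sk))).foldl (fun d p => d.modify p.1 [] (· ++ [p.2]))
      PySem.Dict.empty := by
    rw [List.foldl_map]
  rw [hfold, PySem.Dict.getD_foldl_modify_append, List.filter_map]
  simp [Function.comp_def]

-- closed form of the counting fold: counts[t] is the number of skeletons with stripped title t
theorem pv_counts_getD (skeletons : List (List (String × String))) (t : String) :
    (skeletons.foldl (fun d sk =>
      if pvTitle sk ≠ "" then d.modify (pvTitle sk) 0 (· + 1) else d)
      (PySem.Dict.empty (κ := String) (ν := Int))).getD t 0 =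
    (((pvL skeletons).map pvTitle).count t : Int) := by
  have heq := PySem.List.foldl_ite_eq_foldl_filter (fun sk => pvTitle sk ≠ "")
      (fun (d : PySem.Dict String Int) sk => d.modify (pvTitle sk) 0 (· + 1)) skeletons PySem.Dict.empty
  rw [heq, show List.filter (fun x => decide (pvTitle x ≠ "")) skeletons = pvL skeletons from rfl]
  have hfold : (pvL skeletons).foldl (fun d sk => d.modify (pvTitle sk) 0 (· + 1))
      (PySem.Dict.empty (κ := String) (ν := Int)) =
      ((pvL skeletons).map pvTitle).foldl (fun d x => d.modify x 0 (· + 1)) PySem.Dict.empty := by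
    rw [List.foldl_map]
  rw [hfold, PySem.Dict.getD_foldl_modify_add_one]
  simp [PySem.Dict.getD, PySem.Dict.get?, PySem.Dict.empty]

theorem pv_main (skeletons : List (List (String × String))) (threshold : Int) :
    find_duplicate_titles skeletons threshold =
    (let counts : PySem.Dict String Int :=
      skeletons.foldl (fun d sk =>
        let t := pvTitle sk
        if t ≠ "" then d.modify t 0 (· + 1) else d) PySem.Dict.empty
    let result : PySem.Dict String (List (List (String × String))) :=
      skeletons.foldl (fun r sk =>
        let t := pvTitle sk
        if t ≠ "" ∧ counts.getD t 0 > threshold then r.modify t [] (· ++ [sk]) else r) PySem.Dict.empty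
    result.items) := by
  simp only [find_duplicate_titles]
  set K := pvTitle
  set L := pvL skeletons with hLdef
  set P : String → Bool := fun k => decide (((L.map K).count k : Int) > threshold) with hP
  -- A side
  rw [pv_group_items (fun sk => K sk ≠ "") skeletons]
  -- B side
  rw [pv_group_items (fun sk => K sk ≠ "" ∧
        (skeletons.foldl (fun d sk =>
          if K sk ≠ "" then d.modify (K sk) 0 (· + 1) else d)
          (PySem.Dict.empty (κ := String) (ν := Int))).getD (K sk) 0 > threshold) skeletons]
  have hLf : skeletons.filter (fun sk => decide (K sk ≠ "")) = L := rfl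
  rw [hLf]
  -- simplify B's filter predicate to the count predicate
  have hq : skeletons.filter (fun sk => decide (K sk ≠ "" ∧
        (skeletons.foldl (fun d sk =>
          if K sk ≠ "" then d.modify (K sk) 0 (· + 1) else d)
          (PySem.Dict.empty (κ := String) (ν := Int))).getD (K sk) 0 > threshold)) =
      L.filter (fun sk => P (K sk)) := by
    rw [hLdef]
    simp only [pvL, List.filter_filter]
    apply List.filter_congr
    intro sk _
    rw [Bool.decide_and, pv_counts_getD skeletons (K sk)]
    rw [Bool.and_comm]
  rw [hq]
  -- A's outer filter: push through the map
  rw [List.filter_map]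
  have hpred : ((fun p => decide ((p.2.length : Int) > threshold)) ∘
      (fun k => (k, L.filter (fun sk => K sk == k)))) = P := by
    funext k
    simp only [Function.comp_apply, hP]
    congr 1
    rw [← List.countP_eq_length_filter]
    simp [List.count, List.countP_map, Function.comp_def]
  rw [hpred]
  -- B's key set
  have hkeys : ((L.filter (fun sk => P (K sk))).map K) = (L.map K).filter P := by
    rw [List.filter_map (f := K) (p := P)]
    rfl
  rw [hkeys, pv_ofList_filter]
  -- per-key lists agree where P holds
  apply List.map_congr_left
  intro k hk
  have hPk : P k = true := (List.mem_filter.mp hk).2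
  have hflt : (L.filter (fun sk => P (K sk))).filter (fun sk => K sk == k) =
      L.filter (fun sk => K sk == k) := by
    rw [List.filter_filter]
    apply List.filter_congr
    intro sk _
    by_cases h : K sk = k
    · rw [h, hPk]; simp
    · have hb : (K sk == k) = false := by simpa using h
      rw [hb]; simp
  rw [hflt]

-- ===== VERDICT (by name: the statement is the Claim_ definition above) =====
theorem find_duplicate_titles_spec : Claim_equal_find_duplicate_titles := by
  intro skeletons threshold _
  unfold Spec_find_duplicate_titles
  rw [pv_main]
  rfl
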